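-- pv_equiv track=rewrite | github.com/lopezrfelipe/RadiogenPDAC | src/radiogenpdac/ingestion.py | _normalize_structure_priority
-- ===== SOURCE A (Python) =====
-- DEFAULT_MULTICLASS_STRUCTURE_PRIORITY: list[str] = [
--     "pancreas",
--     "tumor",
--     "artery",
--     "vein",
--     "cbd",
--     "duct",
--     "cyst",
-- ]
--
-- def _normalize_structure_priority(
--     structures: list[str],
--     preferred_order: list[str] | None = None,
-- ) -> list[str]:
--     ordered_structures = preferred_order or DEFAULT_MULTICLASS_STRUCTURE_PRIORITY
--     normalized: list[str] = []
--     for structure in ordered_structures: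
--         if structure in structures and structure not in normalized:
--             normalized.append(structure)
--     for structure in structures:
--         if structure not in normalized:
--             normalized.append(structure)
--     return normalized
-- ===== SOURCE B (Python) =====
-- DEFAULT_MULTICLASS_STRUCTURE_PRIORITY: list[str] = [
--     "pancreas",
--     "tumor",
--     "artery",
--     "vein",
--     "cbd",
--     "duct",
--     "cyst",
-- ]
--
-- def _normalize_structure_priority(structures, preferred_order=None):
--     ordered = preferred_order or DEFAULT_MULTICLASS_STRUCTURE_PRIORITY
--     unique = list(dict.fromkeys(structures))
--     prio = sorted([s for s in unique if s in ordered], key=ordered.index)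
--     return prio + [s for s in unique if s not in ordered]
-- ===== Notes on version B (the rewrite author's own statement) =====
-- stated objective: idiomatic
-- what changed: Replaces A's two membership-scanning append loops with dict.fromkeys dedup followed by a single stable sort of the priority items keyed by ordered.index, appending the non-priority remainder.
import Mathlib
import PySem

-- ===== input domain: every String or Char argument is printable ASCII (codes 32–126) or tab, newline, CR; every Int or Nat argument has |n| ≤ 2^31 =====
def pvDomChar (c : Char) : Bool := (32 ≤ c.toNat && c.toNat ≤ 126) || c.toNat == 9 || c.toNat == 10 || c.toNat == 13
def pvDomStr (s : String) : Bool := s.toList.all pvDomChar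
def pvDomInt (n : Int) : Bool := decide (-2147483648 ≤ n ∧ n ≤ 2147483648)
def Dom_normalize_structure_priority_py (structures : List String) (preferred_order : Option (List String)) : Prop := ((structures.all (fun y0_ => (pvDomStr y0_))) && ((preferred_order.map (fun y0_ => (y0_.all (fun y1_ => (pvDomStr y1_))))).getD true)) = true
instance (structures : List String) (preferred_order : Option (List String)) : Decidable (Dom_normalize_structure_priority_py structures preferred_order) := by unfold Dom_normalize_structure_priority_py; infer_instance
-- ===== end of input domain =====

-- B replaces A's two membership-scanning append loops with a dedup (dict.fromkeys) plus one
-- stable sort of the priority items keyed by ordered.index (objective: idiomatic).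

def DEFAULT_MULTICLASS_STRUCTURE_PRIORITY : List String :=
  ["pancreas", "tumor", "artery", "vein", "cbd", "duct", "cyst"]

-- ===== PORT A =====
def normalize_structure_priority_py (structures : List String) (preferred_order : Option (List String)) : List String :=
  -- 'preferred_order or DEFAULT…': an empty list is falsy in Python
  let ordered_structures :=
    match preferred_order with
    | some l => if l.isEmpty then DEFAULT_MULTICLASS_STRUCTURE_PRIORITY else l
    | none => DEFAULT_MULTICLASS_STRUCTURE_PRIORITY
  let normalized := ordered_structures.foldl
    (fun acc structure_ => if structure_ ∈ structures ∧ structure_ ∉ acc then acc ++ [structure_] else acc) []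
  structures.foldl (fun acc structure_ => if structure_ ∉ acc then acc ++ [structure_] else acc) normalized

-- ===== PORT B =====
def normalize_structure_priority_py_alt (structures : List String) (preferred_order : Option (List String)) : List String :=
  let ordered :=
    match preferred_order with
    | some l => if l.isEmpty then DEFAULT_MULTICLASS_STRUCTURE_PRIORITY else l
    | none => DEFAULT_MULTICLASS_STRUCTURE_PRIORITY
  let unique := PySem.List.dedup structures
  let prio := PySem.List.sorted (unique.filter (fun s => decide (s ∈ ordered)))
    (fun s => (PySem.List.index? ordered s).getD 0) false
  prio ++ unique.filter (fun s => !decide (s ∈ ordered))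

-- ===== PRECONDITION & SPEC =====
def Spec_normalize_structure_priority_py (structures : List String) (preferred_order : Option (List String)) (out : List String) : Prop := out = normalize_structure_priority_py_alt structures preferred_order
instance (structures : List String) (preferred_order : Option (List String)) (out : List String) : Decidable (Spec_normalize_structure_priority_py structures preferred_order out) := by unfold Spec_normalize_structure_priority_py; infer_instance

-- ===== CLAIM (what is proved, stated in full; the proofs are below) =====
def Claim_equal_normalize_structure_priority_py : Prop := ∀ (structures : List String) (preferred_order : Option (List String)), Dom_normalize_structure_priority_py structures preferred_order → Spec_normalize_structure_priority_py structures preferred_order (normalize_structure_priority_py structures preferred_order)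

-- ===== LEMMAS AND PROOFS =====

lemma foldl_add_eq_update (xs : List String) (s : PySem.Set String) :
    xs.foldl PySem.Set.add s = PySem.Set.update s xs := rfl

-- A's first loop is 'set-update with a membership filter': ofList of the filtered priority list.
lemma firstLoop_eq (ord structures : List String) :
    ord.foldl (fun acc s => if s ∈ structures ∧ s ∉ acc then acc ++ [s] else acc) []
      = PySem.Set.ofList (ord.filter (fun s => decide (s ∈ structures))) := by
  have h : ∀ (acc : List String) (s : String),
      (if s ∈ structures ∧ s ∉ acc then acc ++ [s] else acc)
        = if decide (s ∈ structures) = true then PySem.Set.add acc s else acc := by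
    intro acc s
    rw [PySem.Set.add_eq_ite]
    by_cases h1 : s ∈ structures <;> by_cases h2 : s ∈ acc <;> simp [h1, h2]
  simp only [h]
  rw [← List.foldl_filter, foldl_add_eq_update, PySem.Set.update_nil_left]

-- A's second loop is Set.update.
lemma secondLoop_eq (structures : List String) (init : List String) :
    structures.foldl (fun acc s => if s ∉ acc then acc ++ [s] else acc) init
      = PySem.Set.update init structures := by
  have h : ∀ (acc : List String) (s : String),
      (if s ∉ acc then acc ++ [s] else acc) = PySem.Set.add acc s := by
    intro acc s
    rw [PySem.Set.add_eq_ite]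
    by_cases hs : s ∈ acc <;> simp [hs]
  simp only [h]
  exact foldl_add_eq_update structures init

-- first occurrences of a list appear in strictly increasing index order
lemma pairwise_idxOf_ofList (l : List String) :
    (PySem.Set.ofList l).Pairwise (fun a b => l.idxOf a < l.idxOf b) := by
  induction l using List.reverseRecOn with
  | nil => simp [PySem.Set.ofList]
  | append_singleton xs x ih =>
    rw [PySem.Set.ofList_append_singleton]
    by_cases hx : x ∈ PySem.Set.ofList xs
    · rw [PySem.Set.add_of_mem hx]
      refine List.Pairwise.imp_of_mem ?_ ih
      intro a b ha hb hab
      rwa [List.idxOf_append_of_mem ((PySem.Set.mem_ofList _ _).1 ha),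
           List.idxOf_append_of_mem ((PySem.Set.mem_ofList _ _).1 hb)]
    · rw [PySem.Set.add_of_not_mem hx, List.pairwise_append]
      refine ⟨List.Pairwise.imp_of_mem ?_ ih, List.pairwise_singleton _ _, ?_⟩
      · intro a b ha hb hab
        rwa [List.idxOf_append_of_mem ((PySem.Set.mem_ofList _ _).1 ha),
             List.idxOf_append_of_mem ((PySem.Set.mem_ofList _ _).1 hb)]
      · intro a ha b hb
        have ha' : a ∈ xs := (PySem.Set.mem_ofList _ _).1 ha
        have hb' : b = x := by simpa using hb
        subst hb'
        have hxxs : b ∉ xs := fun hmem => hx ((PySem.Set.mem_ofList _ _).2 hmem)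
        rw [List.idxOf_append_of_mem ha', List.idxOf_append_of_notMem hxxs]
        have hlt := List.idxOf_lt_length_of_mem ha'
        simp
        omega

-- relative first-occurrence order inside a filtered list reflects the order in the original list
lemma idxOf_filter_mono (l : List String) (p : String → Bool) :
    ∀ a b, a ∈ l.filter p → b ∈ l.filter p →
      (l.filter p).idxOf a < (l.filter p).idxOf b → l.idxOf a < l.idxOf b := by
  induction l with
  | nil => simp
  | cons x xs ih =>
    intro a b ha hb h
    by_cases hp : p x
    · rw [List.filter_cons_of_pos hp] at ha hb h
      by_cases hax : x = a
      · have hbx : x ≠ b := by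
          intro e
          rw [List.idxOf_cons_eq _ hax, List.idxOf_cons_eq _ e] at h
          omega
        rw [List.idxOf_cons_eq _ hax, List.idxOf_cons_ne _ hbx]
        omega
      · have hbx : x ≠ b := by
          intro e
          rw [List.idxOf_cons_ne _ hax, List.idxOf_cons_eq _ e] at h
          omega
        rw [List.idxOf_cons_ne _ hax, List.idxOf_cons_ne _ hbx] at h
        have ha2 : a ∈ xs.filter p := by
          rcases List.mem_cons.1 ha with e | m
          · exact absurd e.symm hax
          · exact m
        have hb2 : b ∈ xs.filter p := by
          rcases List.mem_cons.1 hb with e | m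
          · exact absurd e.symm hbx
          · exact m
        have hih := ih a b ha2 hb2 (by omega)
        rw [List.idxOf_cons_ne _ hax, List.idxOf_cons_ne _ hbx]
        omega
    · rw [List.filter_cons_of_neg hp] at ha hb h
      have hax : x ≠ a := by
        intro e; subst e
        exact hp (List.mem_filter.1 ha).2
      have hbx : x ≠ b := by
        intro e; subst e
        exact hp (List.mem_filter.1 hb).2
      have := ih a b ha hb h
      rw [List.idxOf_cons_ne _ hax, List.idxOf_cons_ne _ hbx]
      omega

-- ordered.index(a) is idxOf for a present element
lemma index_getD_eq_idxOf (l : List String) (a : String) (h : a ∈ l) :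
    (PySem.List.index? l a).getD 0 = l.idxOf a := by
  rw [PySem.List.index?_eq_idxOf?]
  induction l with
  | nil => cases h
  | cons x xs ih =>
    by_cases hax : x = a
    · subst hax
      simp [List.idxOf?_cons, List.idxOf_cons_eq _ rfl]
    · have hm : a ∈ xs := by
        rcases List.mem_cons.1 h with e | m
        · exact absurd e.symm hax
        · exact m
      have hsome : (xs.idxOf? a).isSome := List.isSome_idxOf?.2 hm
      rcases Option.isSome_iff_exists.1 hsome with ⟨k, hk⟩
      have := ih hm
      rw [List.idxOf?_cons, List.idxOf_cons_ne _ hax]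
      simp only [beq_iff_eq, hax, if_false, hk] at this ⊢
      simp at this
      simp [← this]

lemma main_eq (ord structures : List String) :
    structures.foldl (fun acc s => if s ∉ acc then acc ++ [s] else acc)
      (ord.foldl (fun acc s => if s ∈ structures ∧ s ∉ acc then acc ++ [s] else acc) [])
    = PySem.List.sorted ((PySem.List.dedup structures).filter (fun s => decide (s ∈ ord)))
        (fun s => (PySem.List.index? ord s).getD 0) false
      ++ (PySem.List.dedup structures).filter (fun s => !decide (s ∈ ord)) := by
  rw [firstLoop_eq, secondLoop_eq, PySem.Set.update_eq_append_filter]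
  congr 1
  · symm
    apply PySem.List.sorted_eq_of_perm_of_pairwise_lt
    · apply (List.perm_ext_iff_of_nodup (PySem.Set.nodup_ofList _)
        ((PySem.Set.nodup_ofList structures).filter _)).2
      intro a
      simp only [PySem.Set.mem_ofList, List.mem_filter, decide_eq_true_eq]
      tauto
    · refine List.Pairwise.imp_of_mem ?_
        (pairwise_idxOf_ofList (ord.filter (fun s => decide (s ∈ structures))))
      intro a b ha hb hab
      have ha' := List.mem_filter.1 ((PySem.Set.mem_ofList _ _).1 ha)
      have hb' := List.mem_filter.1 ((PySem.Set.mem_ofList _ _).1 hb)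
      rw [index_getD_eq_idxOf _ _ ha'.1, index_getD_eq_idxOf _ _ hb'.1]
      exact idxOf_filter_mono ord _ a b ((PySem.Set.mem_ofList _ _).1 ha)
        ((PySem.Set.mem_ofList _ _).1 hb) hab
  · rw [PySem.List.dedup_eq_ofList]
    apply List.filter_congr
    intro x hx
    have hxs : x ∈ structures := (PySem.Set.mem_ofList _ _).1 hx
    have : PySem.Set.contains
        (PySem.Set.ofList (ord.filter (fun s => decide (s ∈ structures)))) x
        = decide (x ∈ ord) := by
      rw [Bool.eq_iff_iff]
      simp [PySem.Set.mem_ofList, List.mem_filter, hxs]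
    rw [this]

-- ===== VERDICT (by name: the statement is the Claim_ definition above) =====
theorem normalize_structure_priority_py_spec : Claim_equal_normalize_structure_priority_py := by
  intro structures preferred_order _
  unfold Spec_normalize_structure_priority_py normalize_structure_priority_py normalize_structure_priority_py_alt
  cases preferred_order with
  | none => exact main_eq _ _
  | some l =>
    by_cases h : l.isEmpty <;> simp only [h, if_true] <;> exact main_eq _ _
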